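-- pv_equiv track=rewrite | github.com/Christian-Schefe/adventofcode2023 | day5/day5.py | subdiv_ranges
-- ===== SOURCE A (Python) =====
-- def subdiv_range(seed_range, map):
--     in_min = map[1]
--     out_min = map[0]
--
--     in_max = map[1] + map[2]
--     out_max = map[0] + map[2]
--
--     map_dif = map[3]
--
--     if seed_range[0] >= in_max:
--         return [seed_range], []
--     if seed_range[1] <= in_min:
--         return [seed_range], []
--
--     if seed_range[1] >= in_max:
--         if seed_range[0] < in_min:
--             return [(seed_range[0], in_min), (in_max, seed_range[1])], [(out_min, out_max)]
--         else:
--             return [(in_max, seed_range[1])], [(seed_range[0] + map_dif, out_max)]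
--     else:
--         if seed_range[0] < in_min:
--             return [(seed_range[0], in_min)], [(out_min, seed_range[1] + map_dif)]
--         else:
--             return [], [(seed_range[0] + map_dif, seed_range[1] + map_dif)]
--
-- def subdiv_ranges(seed_ranges, maps):
--     cur_ranges = seed_ranges
--     out_ranges = []
--     for map in maps:
--         new_ranges = []
--         for range in cur_ranges:
--             unmapped_p, mapped_p = subdiv_range(range, map)
--             new_ranges += unmapped_p
--             out_ranges += mapped_p
--         cur_ranges = new_ranges
--
--     out_ranges += cur_ranges
--     return out_ranges
-- ===== SOURCE B (Python) =====
-- def _remnants(s, lo, hi):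
--     a, b = s
--     if a >= hi or b <= lo:
--         return [s]
--     pieces = []
--     if a < lo:
--         pieces.append((a, lo))
--     if b >= hi:
--         pieces.append((hi, b))
--     return pieces
--
--
-- def subdiv_ranges(seed_ranges, maps):
--     if not maps:
--         return list(seed_ranges)
--     m, rest = maps[0], maps[1:]
--     lo, hi, d = m[1], m[1] + m[2], m[3]
--     hit = [s for s in seed_ranges if s[0] < hi and s[1] > lo]
--     mapped = [(m[0] if a < lo else a + d,
--                m[0] + m[2] if b >= hi else b + d) for (a, b) in hit]
--     leftover = [p for s in seed_ranges for p in _remnants(s, lo, hi)]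
--     return mapped + subdiv_ranges(leftover, rest)
-- ===== Notes on version B (the rewrite author's own statement) =====
-- stated objective: alternative
-- what changed: Replaces A's iterative sweep carrying a (live, out) accumulator pair with mutation inside nested loops by a recursion on the map list: each stage builds the mapped pieces with a filter+map comprehension over overlapping ranges and the leftovers with a separate flattening pass, then prepends the mapped pieces to the recursive result.
import Mathlib
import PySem

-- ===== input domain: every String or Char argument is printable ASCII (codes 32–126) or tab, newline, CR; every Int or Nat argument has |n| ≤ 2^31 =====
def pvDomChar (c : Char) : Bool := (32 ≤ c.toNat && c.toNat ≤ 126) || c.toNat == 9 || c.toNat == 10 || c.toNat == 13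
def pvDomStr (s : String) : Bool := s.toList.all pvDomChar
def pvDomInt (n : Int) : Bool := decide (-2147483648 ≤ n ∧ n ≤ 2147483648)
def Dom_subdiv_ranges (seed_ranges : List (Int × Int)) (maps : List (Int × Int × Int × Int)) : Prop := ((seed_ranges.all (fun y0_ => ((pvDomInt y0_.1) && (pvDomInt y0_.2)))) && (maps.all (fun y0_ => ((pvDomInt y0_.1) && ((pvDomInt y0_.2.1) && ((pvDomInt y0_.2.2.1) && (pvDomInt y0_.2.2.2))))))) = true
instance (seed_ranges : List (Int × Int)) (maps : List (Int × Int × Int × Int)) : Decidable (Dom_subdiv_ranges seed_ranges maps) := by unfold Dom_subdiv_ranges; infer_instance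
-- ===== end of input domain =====

-- B recurses on the map list with staged filter/map/flatten passes instead of A's
-- nested accumulator sweep (alternative decomposition, same cost).

-- ===== PORT A =====
-- helper: Python subdiv_range(seed_range, map) → (unmapped pieces, mapped pieces)
def subdivRangeA (seed : Int × Int) (m : Int × Int × Int × Int) :
    List (Int × Int) × List (Int × Int) :=
  let in_min := m.2.1
  let out_min := m.1
  let in_max := m.2.1 + m.2.2.1
  let out_max := m.1 + m.2.2.1
  let map_dif := m.2.2.2
  if seed.1 ≥ in_max then ([seed], [])
  else if seed.2 ≤ in_min then ([seed], [])
  else if seed.2 ≥ in_max then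
    if seed.1 < in_min then
      ([(seed.1, in_min), (in_max, seed.2)], [(out_min, out_max)])
    else
      ([(in_max, seed.2)], [(seed.1 + map_dif, out_max)])
  else if seed.1 < in_min then
    ([(seed.1, in_min)], [(out_min, seed.2 + map_dif)])
  else
    ([], [(seed.1 + map_dif, seed.2 + map_dif)])

def subdiv_ranges (seed_ranges : List (Int × Int)) (maps : List (Int × Int × Int × Int)) : List (Int × Int) :=
  -- state = (cur_ranges, out_ranges); for each map rebuild cur_ranges from []
  let final := maps.foldl
    (fun (st : List (Int × Int) × List (Int × Int)) m =>
      st.1.foldl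
        (fun (acc : List (Int × Int) × List (Int × Int)) r =>
          let p := subdivRangeA r m
          (acc.1 ++ p.1, acc.2 ++ p.2))
        ([], st.2))
    (seed_ranges, [])
  final.2 ++ final.1

-- ===== PORT B =====
-- helper: B's _remnants(s, lo, hi): unmapped pieces of one range
def remnantsB (s : Int × Int) (lo hi : Int) : List (Int × Int) :=
  if s.1 ≥ hi ∨ s.2 ≤ lo then [s]
  else (if s.1 < lo then [(s.1, lo)] else []) ++ (if s.2 ≥ hi then [(hi, s.2)] else [])

def subdiv_ranges_alt (seed_ranges : List (Int × Int)) (maps : List (Int × Int × Int × Int)) : List (Int × Int) :=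
  match maps with
  | [] => seed_ranges
  | m :: rest =>
    let lo := m.2.1
    let hi := m.2.1 + m.2.2.1
    let d := m.2.2.2
    let hit := seed_ranges.filter (fun s => decide (s.1 < hi) && decide (s.2 > lo))
    let mapped := hit.map (fun s =>
      ((if s.1 < lo then m.1 else s.1 + d), (if s.2 ≥ hi then m.1 + m.2.2.1 else s.2 + d)))
    let leftover := seed_ranges.flatMap (fun s => remnantsB s lo hi)
    mapped ++ subdiv_ranges_alt leftover rest

-- ===== PRECONDITION & SPEC =====
def Spec_subdiv_ranges (seed_ranges : List (Int × Int)) (maps : List (Int × Int × Int × Int)) (out : List (Int × Int)) : Prop := out = subdiv_ranges_alt seed_ranges maps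
instance (seed_ranges : List (Int × Int)) (maps : List (Int × Int × Int × Int)) (out : List (Int × Int)) : Decidable (Spec_subdiv_ranges seed_ranges maps out) := by unfold Spec_subdiv_ranges; infer_instance

-- ===== CLAIM (what is proved, stated in full; the proofs are below) =====
def Claim_equal_subdiv_ranges : Prop := ∀ (seed_ranges : List (Int × Int)) (maps : List (Int × Int × Int × Int)), Dom_subdiv_ranges seed_ranges maps → Spec_subdiv_ranges seed_ranges maps (subdiv_ranges seed_ranges maps)

-- ===== LEMMAS AND PROOFS =====
-- A's per-range unmapped pieces are B's remnants
theorem fst_subdivRangeA (r : Int × Int) (m : Int × Int × Int × Int) :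
    (subdivRangeA r m).1 = remnantsB r m.2.1 (m.2.1 + m.2.2.1) := by
  simp only [subdivRangeA, remnantsB]
  by_cases h1 : r.1 ≥ m.2.1 + m.2.2.1 <;>
  by_cases h2 : r.2 ≤ m.2.1 <;>
  by_cases h3 : r.2 ≥ m.2.1 + m.2.2.1 <;>
  by_cases h4 : r.1 < m.2.1 <;>
  simp [h1, h2, h3, h4]

-- A's per-range mapped pieces: a singleton exactly on overlap, B's clip values
theorem snd_subdivRangeA (r : Int × Int) (m : Int × Int × Int × Int) :
    (subdivRangeA r m).2 =
      if r.1 < m.2.1 + m.2.2.1 ∧ r.2 > m.2.1 then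
        [((if r.1 < m.2.1 then m.1 else r.1 + m.2.2.2),
          (if r.2 ≥ m.2.1 + m.2.2.1 then m.1 + m.2.2.1 else r.2 + m.2.2.2))]
      else [] := by
  simp only [subdivRangeA]
  by_cases h1 : r.1 ≥ m.2.1 + m.2.2.1 <;>
  by_cases h2 : r.2 ≤ m.2.1 <;>
  by_cases h3 : r.2 ≥ m.2.1 + m.2.2.1 <;>
  by_cases h4 : r.1 < m.2.1 <;>
  simp [h1, h2, h3, h4]

-- A's inner fold appends the flatMaps of the per-range pieces
theorem innerFoldA (m : Int × Int × Int × Int) (cur xs ys : List (Int × Int)) :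
    cur.foldl
      (fun (acc : List (Int × Int) × List (Int × Int)) r =>
        let p := subdivRangeA r m
        (acc.1 ++ p.1, acc.2 ++ p.2)) (xs, ys)
    = (xs ++ cur.flatMap (fun r => (subdivRangeA r m).1),
       ys ++ cur.flatMap (fun r => (subdivRangeA r m).2)) := by
  induction cur generalizing xs ys with
  | nil => simp
  | cons r t ih => simp [List.foldl_cons, ih]

-- flatMap of "singleton if overlap else []" is map-after-filter
theorem flatMap_mapped (m : Int × Int × Int × Int) (cur : List (Int × Int)) :
    cur.flatMap (fun r => (subdivRangeA r m).2)
    = (cur.filter (fun s => decide (s.1 < m.2.1 + m.2.2.1) && decide (s.2 > m.2.1))).map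
        (fun s => ((if s.1 < m.2.1 then m.1 else s.1 + m.2.2.2),
                   (if s.2 ≥ m.2.1 + m.2.2.1 then m.1 + m.2.2.1 else s.2 + m.2.2.2))) := by
  induction cur with
  | nil => simp
  | cons r t ih =>
    rw [List.flatMap_cons, ih, List.filter_cons, snd_subdivRangeA]
    by_cases h : r.1 < m.2.1 + m.2.2.1 ∧ r.2 > m.2.1 <;> simp [h]

-- A's whole fold (from any out-accumulator) computes B's recursion
theorem foldA_eq (maps : List (Int × Int × Int × Int)) (cur out : List (Int × Int)) :
    (maps.foldl
      (fun (st : List (Int × Int) × List (Int × Int)) m =>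
        st.1.foldl
          (fun (acc : List (Int × Int) × List (Int × Int)) r =>
            let p := subdivRangeA r m
            (acc.1 ++ p.1, acc.2 ++ p.2)) ([], st.2)) (cur, out)).2
    ++ (maps.foldl
      (fun (st : List (Int × Int) × List (Int × Int)) m =>
        st.1.foldl
          (fun (acc : List (Int × Int) × List (Int × Int)) r =>
            let p := subdivRangeA r m
            (acc.1 ++ p.1, acc.2 ++ p.2)) ([], st.2)) (cur, out)).1
    = out ++ subdiv_ranges_alt cur maps := by
  induction maps generalizing cur out with
  | nil => simp [subdiv_ranges_alt]
  | cons m rest ih =>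
    rw [List.foldl_cons]
    rw [innerFoldA, ih]
    simp only [subdiv_ranges_alt, List.nil_append]
    simp [flatMap_mapped, fst_subdivRangeA, List.append_assoc]

-- ===== VERDICT (by name: the statement is the Claim_ definition above) =====
theorem subdiv_ranges_spec : Claim_equal_subdiv_ranges := by
  intro seed_ranges maps _
  unfold Spec_subdiv_ranges subdiv_ranges
  exact foldA_eq maps seed_ranges []
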